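-- pv_equiv track=rewrite | github.com/contextmachine/mmcore | mmcore/ds/union_find.py | group_tuples
-- ===== SOURCE A (Python) =====
-- class UnionFind:
--     def __init__(self, n):
--         self.parent = list(range(n))
--         self.rank = [0] * n
--
--     def find(self, x):
--         if self.parent[x] != x:
--             self.parent[x] = self.find(self.parent[x])  # Path compression
--         return self.parent[x]
--
--     def union(self, x, y):
--         rootX = self.find(x)
--         rootY = self.find(y)
--         if rootX != rootY:
--             # Union by rank
--             if self.rank[rootX] < self.rank[rootY]:
--                 self.parent[rootX] = rootY
--             elif self.rank[rootX] > self.rank[rootY]: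
--                 self.parent[rootY] = rootX
--             else:
--                 self.parent[rootY] = rootX
--                 self.rank[rootX] += 1
--
-- def group_tuples(tuples_list):
--     """
--     Given a list of tuples of integers, return the groups
--     (connected components) of tuples such that any two tuples
--     that share a digit are in the same group.
--     """
--     n = len(tuples_list)
--     uf = UnionFind(n)
--
--     # Map from digit -> list of indices of tuples that contain this digit
--     digit_to_indices = {}
--
--     # Step 1: Build the mapping
--     for i, tup in enumerate(tuples_list):
--         for num in tup:
--             if num not in digit_to_indices:
--                 digit_to_indices[num] = []
--             digit_to_indices[num].append(i)
--
--     # Step 2: Union all tuples that share a digit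
--     for num, indices in digit_to_indices.items():
--         # Union all indices among themselves
--         first_idx = indices[0]
--         for other_idx in indices[1:]:
--             uf.union(first_idx, other_idx)
--
--     # Step 3: Gather by connected components
--     # find the representative (parent) of each index
--     from collections import defaultdict
--
--     root_to_group = defaultdict(list)
--     for i, tup in enumerate(tuples_list):
--         root = uf.find(i)
--         root_to_group[root].append(tup)
--
--     # The values in root_to_group are our groups
--     return list(root_to_group.values())
-- ===== SOURCE B (Python) =====
-- def group_tuples(tuples_list):
--     """
--     Group tuples (connected components: two tuples sharing a digit are
--     connected) by iterative label merging instead of a union-find forest.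
--     """
--     n = len(tuples_list)
--
--     # digit -> indices of tuples containing it (first-seen digit order)
--     digit_to_indices = {}
--     for i, tup in enumerate(tuples_list):
--         for num in tup:
--             if num not in digit_to_indices:
--                 digit_to_indices[num] = []
--             digit_to_indices[num].append(i)
--
--     # component labels: merge by global relabeling, no parent forest
--     label = list(range(n))
--     for indices in digit_to_indices.values():
--         first = label[indices[0]]
--         for idx in indices[1:]:
--             old = label[idx]
--             if old != first:
--                 label = [first if l == old else l for l in label]
--
--     # gather in index order, groups ordered by first occurrence of label
--     groups = {}
--     for i, tup in enumerate(tuples_list):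
--         key = label[i]
--         if key not in groups:
--             groups[key] = []
--         groups[key].append(tup)
--     return list(groups.values())
-- ===== Notes on version B (the rewrite author's own statement) =====
-- stated objective: alternative
-- what changed: Replaces the union-find forest (recursive find with path compression, union by rank, gather by root) with flat component labels merged by global relabeling and a gather keyed by label.
import Mathlib
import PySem

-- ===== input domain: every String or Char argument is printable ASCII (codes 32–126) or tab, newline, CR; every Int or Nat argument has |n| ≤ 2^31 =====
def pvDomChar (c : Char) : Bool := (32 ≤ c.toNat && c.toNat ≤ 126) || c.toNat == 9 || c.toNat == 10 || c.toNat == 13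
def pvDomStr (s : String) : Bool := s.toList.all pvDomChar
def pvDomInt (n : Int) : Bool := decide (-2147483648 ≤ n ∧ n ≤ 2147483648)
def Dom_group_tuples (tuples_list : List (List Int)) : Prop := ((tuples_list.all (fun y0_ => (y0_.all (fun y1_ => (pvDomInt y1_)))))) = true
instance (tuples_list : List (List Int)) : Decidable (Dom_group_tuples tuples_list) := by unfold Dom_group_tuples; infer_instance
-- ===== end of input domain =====

-- B replaces A's union-find forest (recursive find with path compression, union by
-- rank) by flat component labels merged through global relabeling — an alternative
-- algorithm of comparable size, no speed claim.

-- ===== PORT A =====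
-- UnionFind.find: Python's unbounded recursion is run with fuel (parent.length + 1 at
-- every call site); the fuel and the `none` index guard only make the function total —
-- on the states the algorithm builds they are never hit.
def ufFind : Nat → List Int → Int → Int × List Int
  | 0, parent, x => (x, parent)
  | fuel+1, parent, x =>
    match PySem.List.pyGet? parent x with
    | none => (x, parent)
    | some px =>
      if px ≠ x then
        let rp := ufFind fuel parent px
        (rp.1, PySem.List.pySetD rp.2 x rp.1)
      else (x, parent)

-- UnionFind.union (pyGetD on rank: the index is always a root, hence in range)
def ufUnion (parent rank : List Int) (x y : Int) : List Int × List Int :=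
  let f1 := ufFind (parent.length + 1) parent x
  let f2 := ufFind (f1.2.length + 1) f1.2 y
  let rootX := f1.1
  let rootY := f2.1
  if rootX ≠ rootY then
    if PySem.List.pyGetD rank rootX 0 < PySem.List.pyGetD rank rootY 0 then
      (PySem.List.pySetD f2.2 rootX rootY, rank)
    else if PySem.List.pyGetD rank rootY 0 < PySem.List.pyGetD rank rootX 0 then
      (PySem.List.pySetD f2.2 rootY rootX, rank)
    else
      (PySem.List.pySetD f2.2 rootY rootX,
       PySem.List.pySetD rank rootX (PySem.List.pyGetD rank rootX 0 + 1))
  else (f2.2, rank)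

-- Step 1: digit -> list of indices of tuples containing it (enumerate counter in .1)
def digitMapA (tuples_list : List (List Int)) : Int × PySem.Dict Int (List Int) :=
  tuples_list.foldl
    (fun acc tup =>
      (acc.1 + 1,
       tup.foldl (fun d num => d.modify num [] (· ++ [acc.1])) acc.2))
    (0, PySem.Dict.empty)

def group_tuples (tuples_list : List (List Int)) : List (List (List Int)) :=
  let n := PySem.List.len tuples_list
  let parent0 := PySem.List.pyRange 0 n 1
  let rank0 := PySem.List.pyRepeat [(0 : Int)] n
  let dti := (digitMapA tuples_list).2
  let st := dti.values.foldl
    (fun (st : List Int × List Int) indices =>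
      match indices with
      | [] => st
      | first :: rest => rest.foldl (fun st other => ufUnion st.1 st.2 first other) st)
    (parent0, rank0)
  let fin := tuples_list.foldl
    (fun (acc : Int × List Int × PySem.Dict Int (List (List Int))) tup =>
      let fr := ufFind (acc.2.1.length + 1) acc.2.1 acc.1
      (acc.1 + 1, fr.2, acc.2.2.modify fr.1 [] (· ++ [tup])))
    (0, st.1, PySem.Dict.empty)
  fin.2.2.values

-- ===== PORT B =====
def digitMapB (tuples_list : List (List Int)) : Int × PySem.Dict Int (List Int) :=
  tuples_list.foldl
    (fun acc tup =>
      (acc.1 + 1,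
       tup.foldl (fun d num => d.modify num [] (· ++ [acc.1])) acc.2))
    (0, PySem.Dict.empty)

def group_tuples_alt (tuples_list : List (List Int)) : List (List (List Int)) :=
  let n := PySem.List.len tuples_list
  let dti := (digitMapB tuples_list).2
  let label := dti.values.foldl
    (fun lab indices =>
      match indices with
      | [] => lab
      | i0 :: rest =>
        let first := PySem.List.pyGetD lab i0 0
        rest.foldl
          (fun lab idx =>
            let old := PySem.List.pyGetD lab idx 0
            if old ≠ first then lab.map (fun l => if l = old then first else l)
            else lab)
          lab)
    (PySem.List.pyRange 0 n 1)
  let fin := tuples_list.foldl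
    (fun (acc : Int × PySem.Dict Int (List (List Int))) tup =>
      (acc.1 + 1, acc.2.modify (PySem.List.pyGetD label acc.1 0) [] (· ++ [tup])))
    ((0 : Int), PySem.Dict.empty)
  fin.2.values

-- ===== PRECONDITION & SPEC =====
def Spec_group_tuples (tuples_list : List (List Int)) (out : List (List (List Int))) : Prop := out = group_tuples_alt tuples_list
instance (tuples_list : List (List Int)) (out : List (List (List Int))) : Decidable (Spec_group_tuples tuples_list out) := by unfold Spec_group_tuples; infer_instance

-- ===== CLAIM (what is proved, stated in full; the proofs are below) =====
def Claim_equal_group_tuples : Prop := ∀ (tuples_list : List (List Int)), Dom_group_tuples tuples_list → Spec_group_tuples tuples_list (group_tuples tuples_list)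

-- ===== LEMMAS AND PROOFS =====

-- Proof-side vocabulary: the parent list viewed as a step function, component labels.
def InRg (n : Nat) (i : Int) : Prop := 0 ≤ i ∧ i < (n : Int)
def pstep (p : List Int) (i : Int) : Int := PySem.List.pyGetD p i i
def Lab (lab : List Int) (i : Int) : Int := PySem.List.pyGetD lab i 0
def isFixAt (p : List Int) (x : Int) (k : Nat) : Prop :=
  pstep p ((pstep p)^[k] x) = (pstep p)^[k] x

lemma getD_setD {α : Type} (xs : List α) (i j : Int) (v d : α)
    (hi : InRg xs.length i) (hj : InRg xs.length j) :
    PySem.List.pyGetD (PySem.List.pySetD xs i v) j d = if j = i then v else PySem.List.pyGetD xs j d := by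
  obtain ⟨hi0, hi1⟩ := hi; obtain ⟨hj0, hj1⟩ := hj
  rw [PySem.List.pySetD_of_nonneg _ _ hi0,
      PySem.List.pyGetD_eq_getElem _ _ hj0 (by simpa using hj1),
      List.getElem_set]
  by_cases h : j = i
  · rw [if_pos (by omega), if_pos h]
  · rw [if_neg (by omega), if_neg h, PySem.List.pyGetD_eq_getElem _ _ hj0 hj1]

lemma pstep_setD (p : List Int) (i j v : Int)
    (hi : InRg p.length i) (hj : InRg p.length j) :
    pstep (PySem.List.pySetD p i v) j = if j = i then v else pstep p j := by
  unfold pstep; exact getD_setD p i j v j hi hj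

lemma Lab_map (lab : List Int) (g : Int → Int) (j : Int) (hj : InRg lab.length j) :
    Lab (lab.map g) j = g (Lab lab j) := by
  obtain ⟨hj0, hj1⟩ := hj
  unfold Lab
  rw [PySem.List.pyGetD_eq_getElem _ _ hj0 (by simpa using hj1),
      PySem.List.pyGetD_eq_getElem _ _ hj0 hj1, List.getElem_map]

lemma iter_InRg (p : List Int) (hrg : ∀ i, InRg p.length i → InRg p.length (pstep p i))
    (i : Int) (hi : InRg p.length i) (k : Nat) : InRg p.length ((pstep p)^[k] i) := by
  induction k with
  | zero => simpa
  | succ k ih => rw [Function.iterate_succ_apply']; exact hrg _ ih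

lemma iter_fix_ge (p : List Int) (x : Int) (k m : Nat) (hk : isFixAt p x k) (hkm : k ≤ m) :
    (pstep p)^[m] x = (pstep p)^[k] x := by
  obtain ⟨c, rfl⟩ := Nat.exists_eq_add_of_le hkm
  induction c with
  | zero => rfl
  | succ c ih =>
    have : k + (c+1) = (k + c) + 1 := by omega
    rw [this, Function.iterate_succ_apply', ih (by omega)]
    rw [show (pstep p)^[k+c] x = (pstep p)^[k] x from ih (by omega)] at *
    exact hk

lemma fix_fast (p : List Int) (hrg : ∀ i, InRg p.length i → InRg p.length (pstep p i))
    (x : Int) (hx : InRg p.length x) (hfix : ∃ k, isFixAt p x k) :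
    ∃ k < p.length + 1, isFixAt p x k := by
  classical
  have hdec : DecidablePred (fun k => isFixAt p x k) := fun k => by unfold isFixAt; infer_instance
  set K := Nat.find hfix with hK
  have hKfix : isFixAt p x K := Nat.find_spec hfix
  have hmin : ∀ a, a < K → ¬ isFixAt p x a := fun a ha => Nat.find_min hfix ha
  -- the first K+1 iterates are pairwise distinct
  have hinj : ∀ a b, a ≤ K → b ≤ K → (pstep p)^[a] x = (pstep p)^[b] x → a = b := by
    intro a b ha hb heq
    by_contra hne
    -- wlog a < b
    rcases Nat.lt_or_ge a b with hab | hab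
    · -- periodic from a with period b - a, and eventually fixed ⇒ fix at a
      have hper : ∀ t, (pstep p)^[a + t * (b - a)] x = (pstep p)^[a] x := by
        intro t
        induction t with
        | zero => simp
        | succ t ih =>
          have h1 : a + (t+1) * (b - a) = (b - a) + (a + t * (b-a)) := by
            ring_nf
          rw [h1, Function.iterate_add_apply, ih]
          have h2 : (pstep p)^[b - a] ((pstep p)^[a] x) = (pstep p)^[a] x := by
            rw [← Function.iterate_add_apply]
            have : b - a + a = b := by omega
            rw [this, ← heq]
          rw [h2]
      -- choose t so that a + t*(b-a) ≥ K
      have hba : 0 < b - a := by omega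
      have hbig : a + K * (b - a) ≥ K := by
        have := Nat.le_mul_of_pos_right K (show 0 < b - a by omega); omega
      have h3 : (pstep p)^[a + K * (b-a)] x = (pstep p)^[K] x :=
        iter_fix_ge p x K _ hKfix hbig
      have h4 : (pstep p)^[a] x = (pstep p)^[K] x := by rw [← hper K, h3]
      have : isFixAt p x a := by unfold isFixAt; rw [h4]; exact hKfix
      have haK : a < K := by omega
      exact hmin a haK this
    · have hab' : b < a := by omega
      -- symmetric
      have hper : ∀ t, (pstep p)^[b + t * (a - b)] x = (pstep p)^[b] x := by
        intro t
        induction t with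
        | zero => simp
        | succ t ih =>
          have h1 : b + (t+1) * (a - b) = (a - b) + (b + t * (a-b)) := by
            ring_nf
          rw [h1, Function.iterate_add_apply, ih]
          have h2 : (pstep p)^[a - b] ((pstep p)^[b] x) = (pstep p)^[b] x := by
            rw [← Function.iterate_add_apply]
            have : a - b + b = a := by omega
            rw [this, heq]
          rw [h2]
      have hbig : b + K * (a - b) ≥ K := by
        have := Nat.le_mul_of_pos_right K (show 0 < a - b by omega); omega
      have h3 : (pstep p)^[b + K * (a-b)] x = (pstep p)^[K] x :=
        iter_fix_ge p x K _ hKfix hbig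
      have h4 : (pstep p)^[b] x = (pstep p)^[K] x := by rw [← hper K, h3]
      have : isFixAt p x b := by unfold isFixAt; rw [h4]; exact hKfix
      exact hmin b (by omega) this
  -- pigeonhole: K+1 distinct values in [0, length)
  have hcard : K + 1 ≤ p.length := by
    have hsub : ∀ a ∈ Finset.range (K+1), (pstep p)^[a] x ∈ Finset.Ico (0:ℤ) (p.length : ℤ) := by
      intro a _
      have := iter_InRg p hrg x hx a
      simp only [Finset.mem_Ico]
      exact ⟨this.1, this.2⟩
    have hinj' : Set.InjOn (fun a => (pstep p)^[a] x) (Finset.range (K+1)) := by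
      intro a ha b hb heq
      simp only [Finset.coe_range, Set.mem_Iio] at ha hb
      exact hinj a b (by omega) (by omega) heq
    have := Finset.card_le_card_of_injOn _ hsub hinj'
    simpa using this
  exact ⟨K, by omega, hKfix⟩

lemma T_preserve_set (q q' : List Int) (x r : Int)
    (hlen : q'.length = q.length)
    (hq' : ∀ j, InRg q.length j → pstep q' j = if j = x then r else pstep q j)
    (hr : pstep q' r = r)
    (hT : ∀ i, InRg q.length i → ∃ k, isFixAt q i k)
    (hrg : ∀ i, InRg q.length i → InRg q.length (pstep q i)) :
    ∀ i, InRg q'.length i → ∃ k, isFixAt q' i k := by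
  intro i hi
  rw [hlen] at hi
  obtain ⟨k, hk⟩ := hT i hi
  induction k using Nat.strong_induction_on generalizing i with
  | _ k ih =>
    by_cases hx0 : i = x
    · subst hx0
      refine ⟨1, ?_⟩
      unfold isFixAt
      have h1 : pstep q' i = r := by rw [hq' i hi]; simp
      simp only [Function.iterate_one, h1, hr]
    · have hstep : pstep q' i = pstep q i := by rw [hq' i hi, if_neg hx0]
      by_cases hf : pstep q i = i
      · exact ⟨0, by unfold isFixAt; simpa [hstep] using hf⟩
      · cases k with
        | zero => exact absurd (by simpa [isFixAt] using hk) hf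
        | succ k =>
          have hk' : isFixAt q (pstep q i) k := by
            unfold isFixAt at hk ⊢
            rwa [Function.iterate_succ_apply] at hk
          obtain ⟨m, hm⟩ := ih k (by omega) (pstep q i) (hrg i hi) hk'
          refine ⟨m + 1, ?_⟩
          unfold isFixAt at hm ⊢
          rw [Function.iterate_succ_apply, hstep]
          exact hm

def isRoot (p : List Int) (i : Int) : Prop := InRg p.length i ∧ pstep p i = i
def UFInv (p lab : List Int) : Prop :=
  p.length = lab.length ∧
  (∀ i, InRg p.length i → InRg p.length (pstep p i)) ∧
  (∀ i, InRg p.length i → Lab lab (pstep p i) = Lab lab i) ∧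
  (∀ i j, isRoot p i → isRoot p j → Lab lab i = Lab lab j → i = j) ∧
  (∀ i, InRg p.length i → ∃ k, isFixAt p i k)

lemma pyGet?_inrg (p : List Int) (x : Int) (hx : InRg p.length x) :
    PySem.List.pyGet? p x = some (pstep p x) := by
  obtain ⟨h0, h1⟩ := hx
  rw [PySem.List.pyGet?_eq_some_getElem _ h0 h1]
  unfold pstep
  rw [PySem.List.pyGetD_eq_getElem _ _ h0 h1]

lemma find_spec (fuel : Nat) (p lab : List Int) (x : Int)
    (hInv : UFInv p lab) (hx : InRg p.length x)
    (hfuel : ∃ k < fuel, isFixAt p x k) :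
    ((ufFind fuel p x).2).length = p.length ∧
    isRoot (ufFind fuel p x).2 (ufFind fuel p x).1 ∧
    Lab lab (ufFind fuel p x).1 = Lab lab x ∧
    (∀ z, isRoot (ufFind fuel p x).2 z ↔ isRoot p z) ∧
    UFInv (ufFind fuel p x).2 lab := by
  induction fuel generalizing p x with
  | zero => obtain ⟨k, hk, _⟩ := hfuel; omega
  | succ fuel IH =>
    obtain ⟨hlen, hrgP, hbP, hcP, hTP⟩ := hInv
    obtain ⟨k, hkf, hkfix⟩ := hfuel
    have h1 := pyGet?_inrg p x hx
    by_cases hne : pstep p x = x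
    · -- x already a root
      have hred : ufFind (fuel+1) p x = (x, p) := by
        simp [ufFind, h1, hne]
      rw [hred]
      exact ⟨rfl, ⟨hx, hne⟩, rfl, fun z => Iff.rfl, ⟨hlen, hrgP, hbP, hcP, hTP⟩⟩
    · have hk0 : k ≠ 0 := by
        intro h; apply hne; simpa [isFixAt, h] using hkfix
      have hkfix' : isFixAt p (pstep p x) (k - 1) := by
        unfold isFixAt at hkfix ⊢
        have hks : k = (k-1) + 1 := by omega
        rw [hks, Function.iterate_succ_apply] at hkfix
        exact hkfix
      have hpx : InRg p.length (pstep p x) := hrgP x hx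
      have IH' := IH p (pstep p x) ⟨hlen, hrgP, hbP, hcP, hTP⟩ hpx ⟨k-1, by omega, hkfix'⟩
      obtain ⟨hlen1, hroot1, hlab1, hiff1, hInv1⟩ := IH'
      set rp := ufFind fuel p (pstep p x) with hrp
      have hred : ufFind (fuel+1) p x = (rp.1, PySem.List.pySetD rp.2 x rp.1) := by
        simp only [ufFind, h1, hne, ne_eq, not_false_iff, if_true]
        rw [hrp]
      rw [hred]
      obtain ⟨hlen1', hrg1, hb1, hc1, hT1⟩ := hInv1
      set r := rp.1
      set p1 := rp.2
      have hrIn1 : InRg p1.length r := hroot1.1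
      have hxIn1 : InRg p1.length x := by rwa [hlen1]
      have hrne : r ≠ x := by
        intro h
        apply hne
        have : isRoot p x := (hiff1 x).1 (h ▸ hroot1)
        exact this.2
      have hstep2 : ∀ j, InRg p1.length j →
          pstep (PySem.List.pySetD p1 x r) j = if j = x then r else pstep p1 j :=
        fun j hj => pstep_setD p1 x j r hxIn1 hj
      set p2 := PySem.List.pySetD p1 x r with hp2
      have hlen2 : p2.length = p1.length := PySem.List.length_pySetD p1 x r
      have hroot2 : isRoot p2 r := by
        refine ⟨by rwa [hlen2], ?_⟩
        rw [hstep2 r hrIn1, if_neg hrne]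
        exact hroot1.2
      have hlabrx : Lab lab r = Lab lab x := by rw [hlab1]; exact hbP x hx
      have hiff2 : ∀ z, isRoot p2 z ↔ isRoot p z := by
        intro z
        by_cases hzIn : InRg p1.length z
        · by_cases hzx : z = x
          · subst hzx
            constructor
            · intro hzr
              exfalso
              have h' := hzr.2
              rw [hstep2 _ hzIn, if_pos rfl] at h'
              exact hrne h'
            · intro hzr
              exact absurd hzr.2 hne
          · constructor
            · intro hzr
              refine (hiff1 z).1 ⟨hzIn, ?_⟩
              have h' := hzr.2
              rwa [hstep2 z hzIn, if_neg hzx] at h'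
            · intro hzr
              have h' := (hiff1 z).2 hzr
              refine ⟨by rwa [hlen2], ?_⟩
              rw [hstep2 z hzIn, if_neg hzx]
              exact h'.2
        · constructor
          · intro hzr
            exact absurd (hlen2 ▸ hzr.1) hzIn
          · intro hzr
            exact absurd (hlen1 ▸ hzr.1 : InRg p1.length z) hzIn
      have hrg2 : ∀ i, InRg p2.length i → InRg p2.length (pstep p2 i) := by
        intro j hj
        rw [hlen2] at hj ⊢
        rw [hstep2 j hj]
        split_ifs
        · exact hrIn1
        · exact hrg1 j hj
      have hb2 : ∀ i, InRg p2.length i → Lab lab (pstep p2 i) = Lab lab i := by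
        intro j hj
        rw [hlen2] at hj
        rw [hstep2 j hj]
        split_ifs with hjx
        · rw [hjx]; exact hlabrx
        · exact hb1 j hj
      have hc2 : ∀ i j, isRoot p2 i → isRoot p2 j → Lab lab i = Lab lab j → i = j := by
        intro i j hi hj hl
        exact hc1 i j ((hiff1 i).2 ((hiff2 i).1 hi)) ((hiff1 j).2 ((hiff2 j).1 hj)) hl
      have hT2 : ∀ i, InRg p2.length i → ∃ k, isFixAt p2 i k :=
        T_preserve_set p1 p2 x r hlen2 hstep2 hroot2.2 hT1 hrg1
      exact ⟨hlen2.trans hlen1, hroot2, hlabrx, hiff2,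
        hlen2.trans hlen1', hrg2, hb2, hc2, hT2⟩

lemma link_spec (p lab : List Int) (w l o f : Int)
    (hInv : UFInv p lab) (hw : isRoot p w) (hl : isRoot p l) (hne : w ≠ l)
    (hassoc : (o = Lab lab l ∧ f = Lab lab w) ∨ (o = Lab lab w ∧ f = Lab lab l)) :
    UFInv (PySem.List.pySetD p l w) (lab.map (fun t => if t = o then f else t)) := by
  obtain ⟨hlen, hrg, hb, hc, hT⟩ := hInv
  set g := fun t : Int => if t = o then f else t with hg
  set p' := PySem.List.pySetD p l w with hp'
  set lab' := lab.map g with hlab'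
  have hlenp' : p'.length = p.length := PySem.List.length_pySetD p l w
  have hlenl' : lab'.length = lab.length := by simp [hlab']
  have hstep' : ∀ j, InRg p.length j → pstep p' j = if j = l then w else pstep p j :=
    fun j hj => pstep_setD p l j w hl.1 hj
  have hLab' : ∀ z, InRg p.length z → Lab lab' z = g (Lab lab z) := by
    intro z hz
    exact Lab_map lab g z (hlen ▸ hz)
  have hgf : g f = f := by by_cases h : f = o <;> simp [hg, h]
  have hgo : g o = f := by simp only [hg, if_pos rfl]
  have hwl_lab : g (Lab lab w) = f ∧ g (Lab lab l) = f := by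
    rcases hassoc with ⟨h1, h2⟩ | ⟨h1, h2⟩
    · constructor
      · rw [← h2]; exact hgf
      · rw [← h1]; exact hgo
    · constructor
      · rw [← h1]; exact hgo
      · rw [← h2]; exact hgf
  have hnel : pstep p' l = w := by rw [hstep' l hl.1, if_pos rfl]
  have hrootsIff : ∀ z, isRoot p' z ↔ (isRoot p z ∧ z ≠ l) := by
    intro z
    by_cases hzIn : InRg p.length z
    · by_cases hzl : z = l
      · subst hzl
        constructor
        · intro hzr
          exfalso
          have h' := hzr.2
          rw [hnel] at h'
          exact hne h'
        · rintro ⟨_, hll⟩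
          exact absurd rfl hll
      · constructor
        · intro hzr
          have h' := hzr.2
          rw [hstep' z hzIn, if_neg hzl] at h'
          exact ⟨⟨hzIn, h'⟩, hzl⟩
        · intro ⟨hzr, _⟩
          refine ⟨by rwa [hlenp'], ?_⟩
          rw [hstep' z hzIn, if_neg hzl]
          exact hzr.2
    · constructor
      · intro hzr; exact absurd (hlenp' ▸ hzr.1) hzIn
      · intro ⟨hzr, _⟩; exact absurd hzr.1 hzIn
  -- labels of surviving roots are untouched unless equal to o or f; either way the
  -- only surviving root with g-image f is w
  have hrootf : ∀ z, isRoot p z → z ≠ l → g (Lab lab z) = f → z = w := by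
    intro z hz hzl hgz
    by_cases hzo : Lab lab z = o
    · rcases hassoc with ⟨h1, _⟩ | ⟨h1, _⟩
      · exact absurd (hc z l hz hl (by rw [hzo, h1])) hzl
      · exact hc z w hz hw (by rw [hzo, h1])
    · have : Lab lab z = f := by
        have := hgz
        rw [hg] at this
        simp only [if_neg hzo] at this
        exact this
      rcases hassoc with ⟨_, h2⟩ | ⟨_, h2⟩
      · exact hc z w hz hw (by rw [this, h2])
      · exact absurd (hc z l hz hl (by rw [this, h2])) hzl
  refine ⟨by rw [hlenp', hlenl', hlen], ?_, ?_, ?_, ?_⟩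
  · -- ranged
    intro j hj
    rw [hlenp'] at hj ⊢
    rw [hstep' j hj]
    split_ifs
    · exact hw.1
    · exact hrg j hj
  · -- labels constant along edges
    intro j hj
    rw [hlenp'] at hj
    rw [hstep' j hj]
    split_ifs with hjl
    · subst hjl
      rw [hLab' w hw.1, hLab' j hl.1, hwl_lab.1, hwl_lab.2]
    · rw [hLab' (pstep p j) (hrg j hj), hLab' j hj, hb j hj]
  · -- distinct labels on distinct roots
    intro i j hi hj hlij
    obtain ⟨hi', hil⟩ := (hrootsIff i).1 hi
    obtain ⟨hj', hjl⟩ := (hrootsIff j).1 hj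
    rw [hLab' i hi'.1, hLab' j hj'.1] at hlij
    by_cases hif : g (Lab lab i) = f
    · have hjf : g (Lab lab j) = f := by rw [← hlij]; exact hif
      rw [hrootf i hi' hil hif, hrootf j hj' hjl hjf]
    · have hii : g (Lab lab i) = Lab lab i := by
        by_cases h : Lab lab i = o
        · exact absurd (by simp [hg, h]) hif
        · simp [hg, h]
      have hjj : g (Lab lab j) = Lab lab j := by
        by_cases h : Lab lab j = o
        · exfalso
          apply hif
          rw [hlij]
          simp [hg, h]
        · simp [hg, h]
      exact hc i j hi' hj' (by rw [← hii, ← hjj]; exact hlij)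
  · -- termination
    have hwroot' : pstep p' w = w := by
      rw [hstep' w hw.1, if_neg hne]
      exact hw.2
    exact T_preserve_set p p' l w hlenp' hstep' hwroot' hT hrg

lemma step_spec (p rank lab : List Int) (u v f : Int)
    (hInv : UFInv p lab) (hu : InRg p.length u) (hv : InRg p.length v)
    (hf : f = Lab lab u) :
    UFInv (ufUnion p rank u v).1
      (if PySem.List.pyGetD lab v 0 ≠ f then lab.map (fun t => if t = PySem.List.pyGetD lab v 0 then f else t) else lab) ∧
    (ufUnion p rank u v).1.length = p.length ∧
    (if PySem.List.pyGetD lab v 0 ≠ f then lab.map (fun t => if t = PySem.List.pyGetD lab v 0 then f else t) else lab).length = lab.length ∧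
    Lab (if PySem.List.pyGetD lab v 0 ≠ f then lab.map (fun t => if t = PySem.List.pyGetD lab v 0 then f else t) else lab) u = f := by
  have hlen0 := hInv.1
  have hrg0 := hInv.2.1
  have hT0 := hInv.2.2.2.2
  have hfuel1 : ∃ k < p.length + 1, isFixAt p u k := fix_fast p hrg0 u hu (hT0 u hu)
  obtain ⟨hlen1, hroot1, hlab1, hiff1, hInv1⟩ :=
    find_spec (p.length + 1) p lab u hInv hu hfuel1
  set p1 := (ufFind (p.length + 1) p u).2 with hp1
  set rX := (ufFind (p.length + 1) p u).1 with hrX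
  have hv1 : InRg p1.length v := by rwa [hlen1]
  have hfuel2 : ∃ k < p1.length + 1, isFixAt p1 v k :=
    fix_fast p1 hInv1.2.1 v hv1 (hInv1.2.2.2.2 v hv1)
  obtain ⟨hlen2, hroot2, hlab2, hiff2, hInv2⟩ :=
    find_spec (p1.length + 1) p1 lab v hInv1 hv1 hfuel2
  set p2 := (ufFind (p1.length + 1) p1 v).2 with hp2
  set rY := (ufFind (p1.length + 1) p1 v).1 with hrY
  have hrootX2 : isRoot p2 rX := (hiff2 rX).2 hroot1
  have hrootY2 : isRoot p2 rY := hroot2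
  have hlenp2 : p2.length = p.length := hlen2.trans hlen1
  have hlabX : Lab lab rX = f := by rw [hlab1, ← hf]
  have hlabY : Lab lab rY = Lab lab v := hlab2
  set old := PySem.List.pyGetD lab v 0 with hold
  have holdv : old = Lab lab v := rfl
  have hEq : rX = rY ↔ old = f := by
    constructor
    · intro h
      rw [holdv, ← hlabY, ← h, hlabX]
    · intro h
      exact hInv2.2.2.2.1 rX rY hrootX2 hrootY2 (by rw [hlabX, hlabY, ← holdv, h])
  have hassocL : old = Lab lab rY ∧ f = Lab lab rX := ⟨hlabY.symm, hlabX.symm⟩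
  have hInRgU : InRg lab.length u := hlen0 ▸ hu
  have hgff : ∀ (oo : Int), Lab (lab.map (fun t => if t = oo then f else t)) u = f := by
    intro oo
    rw [Lab_map lab _ u hInRgU, hf]
    by_cases h : Lab lab u = oo <;> simp [h]
  -- reduce ufUnion
  simp only [ufUnion, ← hp1, ← hrX, ← hp2, ← hrY]
  by_cases hxy : rX = rY
  · have hold_f : ¬ old ≠ f := by simp [hEq.1 hxy]
    rw [if_neg (by simpa using hxy), if_neg hold_f]
    exact ⟨hInv2, hlenp2, rfl, hf.symm⟩
  · have hold_f : old ≠ f := fun h => hxy (hEq.2 h)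
    rw [if_pos (by simpa using hxy), if_pos hold_f]
    have hlink : ∀ wl : Int × Int,
        (wl = (rY, rX) ∨ wl = (rX, rY)) →
        UFInv (PySem.List.pySetD p2 wl.2 wl.1) (lab.map (fun t => if t = old then f else t)) := by
      rintro wl (rfl | rfl)
      · exact link_spec p2 lab rY rX old f hInv2 hrootY2 hrootX2 (fun h => hxy h.symm)
          (Or.inr hassocL)
      · exact link_spec p2 lab rX rY old f hInv2 hrootX2 hrootY2 hxy
          (Or.inl ⟨hassocL.1, hassocL.2⟩)
    have hlenset : ∀ a b : Int, (PySem.List.pySetD p2 a b).length = p.length := by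
      intro a b
      rw [PySem.List.length_pySetD, hlenp2]
    split_ifs with h1 h2
    · exact ⟨hlink (rY, rX) (Or.inl rfl), hlenset _ _, by simp, hgff old⟩
    · exact ⟨hlink (rX, rY) (Or.inr rfl), hlenset _ _, by simp, hgff old⟩
    · exact ⟨hlink (rX, rY) (Or.inr rfl), hlenset _ _, by simp, hgff old⟩

lemma inner_spec (rest : List Int) (p rank lab : List Int) (u f : Int)
    (hInv : UFInv p lab) (hu : InRg p.length u)
    (hrest : ∀ j ∈ rest, InRg p.length j) (hf : f = Lab lab u) :
    UFInv (rest.foldl (fun st other => ufUnion st.1 st.2 u other) (p, rank)).1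
      (rest.foldl (fun lab idx =>
          let old := PySem.List.pyGetD lab idx 0
          if old ≠ f then lab.map (fun l => if l = old then f else l) else lab) lab) ∧
    (rest.foldl (fun st other => ufUnion st.1 st.2 u other) (p, rank)).1.length = p.length ∧
    (rest.foldl (fun lab idx =>
        let old := PySem.List.pyGetD lab idx 0
        if old ≠ f then lab.map (fun l => if l = old then f else l) else lab) lab).length = lab.length ∧
    Lab (rest.foldl (fun lab idx =>
        let old := PySem.List.pyGetD lab idx 0
        if old ≠ f then lab.map (fun l => if l = old then f else l) else lab) lab) u = f := by
  induction rest generalizing p rank lab with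
  | nil => exact ⟨hInv, rfl, rfl, hf.symm⟩
  | cons v rest ih =>
    simp only [List.foldl_cons]
    have hv : InRg p.length v := hrest v (List.mem_cons_self ..)
    obtain ⟨hInv', hlenA', hlenB', hlab'⟩ := step_spec p rank lab u v f hInv hu hv hf
    have hrest' : ∀ j ∈ rest, InRg (ufUnion p rank u v).1.length j := by
      intro j hj
      rw [hlenA']
      exact hrest j (List.mem_cons_of_mem _ hj)
    have hu' : InRg (ufUnion p rank u v).1.length u := by rwa [hlenA']
    obtain ⟨h1, h2, h3, h4⟩ := ih (ufUnion p rank u v).1 (ufUnion p rank u v).2 _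
      hInv' hu' hrest' hlab'.symm
    exact ⟨h1, by rw [h2, hlenA'], by rw [h3, hlenB'], h4⟩

lemma outer_spec (ls : List (List Int)) (p rank lab : List Int)
    (hInv : UFInv p lab) (hls : ∀ l ∈ ls, ∀ j ∈ l, InRg p.length j) :
    UFInv (ls.foldl
        (fun (st : List Int × List Int) indices =>
          match indices with
          | [] => st
          | first :: rest => rest.foldl (fun st other => ufUnion st.1 st.2 first other) st)
        (p, rank)).1
      (ls.foldl
        (fun lab indices =>
          match indices with
          | [] => lab
          | i0 :: rest =>
            let first := PySem.List.pyGetD lab i0 0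
            rest.foldl
              (fun lab idx =>
                let old := PySem.List.pyGetD lab idx 0
                if old ≠ first then lab.map (fun l => if l = old then first else l)
                else lab)
              lab)
        lab) ∧
    (ls.foldl
        (fun (st : List Int × List Int) indices =>
          match indices with
          | [] => st
          | first :: rest => rest.foldl (fun st other => ufUnion st.1 st.2 first other) st)
        (p, rank)).1.length = p.length := by
  induction ls generalizing p rank lab with
  | nil => exact ⟨hInv, rfl⟩
  | cons indices ls ih =>
    simp only [List.foldl_cons]
    cases indices with
    | nil =>
      exact ih p rank lab hInv (fun l hl => hls l (List.mem_cons_of_mem _ hl))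
    | cons i0 rest =>
      have hi0 : InRg p.length i0 :=
        hls _ (List.mem_cons_self ..) i0 (List.mem_cons_self ..)
      have hrest : ∀ j ∈ rest, InRg p.length j :=
        fun j hj => hls _ (List.mem_cons_self ..) j (List.mem_cons_of_mem _ hj)
      obtain ⟨hInv', hlenA', hlenB', _⟩ :=
        inner_spec rest p rank lab i0 (PySem.List.pyGetD lab i0 0) hInv hi0 hrest rfl
      obtain ⟨h1, h2⟩ := ih _ _ _ hInv' (by
        intro l hl j hj
        rw [hlenA']
        exact hls l (List.mem_cons_of_mem _ hl) j hj)
      exact ⟨h1, by rw [h2, hlenA']⟩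

lemma mem_values_getD {κ ν : Type} [BEq κ] [LawfulBEq κ] (d : PySem.Dict κ ν) (k : κ)
    (dflt : ν) : d.getD k dflt = dflt ∨ d.getD k dflt ∈ d.values := by
  cases hg : d.get? k with
  | none => exact Or.inl (PySem.Dict.getD_of_get?_eq_none d dflt hg)
  | some v =>
    right
    rw [PySem.Dict.getD_of_get?_eq_some d dflt hg]
    have := PySem.Dict.mem_items_of_get?_eq_some d hg
    exact List.mem_map.2 ⟨(k, v), this, rfl⟩

lemma dm_tup (tup : List Int) (i0 : Int) (d0 : PySem.Dict Int (List Int))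
    (h0 : ∀ v ∈ d0.values, ∀ j ∈ v, 0 ≤ j ∧ j < i0 + 1) (hi0 : 0 ≤ i0) :
    ∀ v ∈ (tup.foldl (fun d num => d.modify num [] (· ++ [i0])) d0).values,
      ∀ j ∈ v, 0 ≤ j ∧ j < i0 + 1 := by
  induction tup generalizing d0 with
  | nil => exact h0
  | cons num tup ih =>
    simp only [List.foldl_cons]
    apply ih
    intro v hv j hj
    unfold PySem.Dict.modify at hv
    have := PySem.Dict.mem_values_insert _ _ _ _ hv
    rcases this with h | h
    · subst h
      rcases List.mem_append.1 hj with hj | hj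
      · rcases mem_values_getD d0 num [] with he | he
        · rw [he] at hj; cases hj
        · exact h0 _ he j hj
      · simp only [List.mem_singleton] at hj
        subst hj
        omega
    · exact h0 v h j hj

lemma dm_aux (ys : List (List Int)) (i0 : Int) (d0 : PySem.Dict Int (List Int))
    (h0 : ∀ v ∈ d0.values, ∀ j ∈ v, 0 ≤ j ∧ j < i0) (hi0 : 0 ≤ i0) :
    (ys.foldl
        (fun acc tup =>
          (acc.1 + 1, tup.foldl (fun d num => d.modify num [] (· ++ [acc.1])) acc.2))
        (i0, d0)).1 = i0 + ys.length ∧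
    ∀ v ∈ (ys.foldl
        (fun acc tup =>
          (acc.1 + 1, tup.foldl (fun d num => d.modify num [] (· ++ [acc.1])) acc.2))
        (i0, d0)).2.values,
      ∀ j ∈ v, 0 ≤ j ∧ j < i0 + ys.length := by
  induction ys generalizing i0 d0 with
  | nil => exact ⟨by simp, by simpa using h0⟩
  | cons tup ys ih =>
    simp only [List.foldl_cons]
    have h1 : ∀ v ∈ (tup.foldl (fun d num => d.modify num [] (· ++ [i0])) d0).values,
        ∀ j ∈ v, 0 ≤ j ∧ j < i0 + 1 := by
      apply dm_tup tup i0 d0 _ hi0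
      intro v hv j hj
      have := h0 v hv j hj
      omega
    obtain ⟨ha, hb⟩ := ih (i0 + 1) _ h1 (by omega)
    refine ⟨by rw [ha]; simp; omega, ?_⟩
    intro v hv j hj
    have := hb v hv j hj
    have hl : (tup :: ys).length = ys.length + 1 := rfl
    rw [hl]
    push_cast
    omega

lemma digitMap_range (tl : List (List Int)) :
    ∀ v ∈ (digitMapA tl).2.values, ∀ j ∈ v, InRg tl.length j := by
  have := dm_aux tl 0 PySem.Dict.empty (by intro v hv; simp [PySem.Dict.values, PySem.Dict.empty] at hv) le_rfl
  intro v hv j hj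
  have h := this.2 v hv j hj
  exact ⟨h.1, by have := h.2; omega⟩

lemma init_inv (n : Nat) :
    UFInv (PySem.List.pyRange 0 (n : Int) 1) (PySem.List.pyRange 0 (n : Int) 1) := by
  have hlen : (PySem.List.pyRange 0 (n : Int) 1).length = n := by
    rw [PySem.List.length_pyRange_one]; simp
  have hid : ∀ i, InRg (PySem.List.pyRange 0 (n : Int) 1).length i →
      pstep (PySem.List.pyRange 0 (n : Int) 1) i = i := by
    intro i hi
    rw [hlen] at hi
    obtain ⟨hi1, hi2⟩ := hi
    unfold pstep
    rw [PySem.List.pyGetD_eq_getElem _ _ hi1 (by rw [hlen]; exact_mod_cast hi2),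
        PySem.List.getElem_pyRange_one]
    omega
  have hlab : ∀ i, InRg (PySem.List.pyRange 0 (n : Int) 1).length i →
      Lab (PySem.List.pyRange 0 (n : Int) 1) i = i := by
    intro i hi
    rw [hlen] at hi
    obtain ⟨hi1, hi2⟩ := hi
    unfold Lab
    rw [PySem.List.pyGetD_eq_getElem _ _ hi1 (by rw [hlen]; exact_mod_cast hi2),
        PySem.List.getElem_pyRange_one]
    omega
  refine ⟨rfl, ?_, ?_, ?_, ?_⟩
  · intro i hi; rw [hid i hi]; exact hi
  · intro i hi; rw [hid i hi]
  · intro i j hi hj hij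
    rw [hlab i hi.1, hlab j hj.1] at hij
    exact hij
  · intro i hi
    exact ⟨0, by simpa [isFixAt] using hid i hi⟩

lemma dict_step (p lab : List Int) (dA dB : PySem.Dict Int (List (List Int)))
    (r key : Int) (tup : List Int)
    (hInv : UFInv p lab) (hr : isRoot p r) (hkey : key = Lab lab r)
    (hC1 : dB.items = dA.items.map (fun pr => (Lab lab pr.1, pr.2)))
    (hC2 : ∀ pr ∈ dA.items, isRoot p pr.1)
    (hC3 : dA.keys.Nodup) :
    (dB.modify key [] (· ++ [tup])).items
        = (dA.modify r [] (· ++ [tup])).items.map (fun pr => (Lab lab pr.1, pr.2)) ∧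
    (∀ pr ∈ (dA.modify r [] (· ++ [tup])).items, isRoot p pr.1) ∧
    (dA.modify r [] (· ++ [tup])).keys.Nodup := by
  have hc := hInv.2.2.2.1
  have hkeyroots : ∀ k ∈ dA.keys, isRoot p k := by
    intro k hk
    simp only [PySem.Dict.keys] at hk
    obtain ⟨pr, hpr, rfl⟩ := List.mem_map.1 hk
    exact hC2 pr hpr
  have hkeyinj : ∀ pr ∈ dA.items, (Lab lab pr.1 = key ↔ pr.1 = r) := by
    intro pr hpr
    constructor
    · intro h
      exact hc pr.1 r (hC2 pr hpr) hr (by rw [h, hkey])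
    · intro h; rw [h, hkey]
  have hkeysB : dB.keys = dA.keys.map (Lab lab) := by
    simp only [PySem.Dict.keys, hC1, List.map_map]
    rfl
  have hmemiff : r ∈ dA.keys ↔ key ∈ dB.keys := by
    rw [hkeysB]
    constructor
    · intro h
      exact List.mem_map.2 ⟨r, h, hkey.symm⟩
    · intro h
      obtain ⟨k, hk, hkk⟩ := List.mem_map.1 h
      obtain ⟨pr, hpr, rfl⟩ := List.mem_map.1 (by simpa only [PySem.Dict.keys] using hk :
        k ∈ dA.items.map (fun x => x.1))
      rwa [← (hkeyinj pr hpr).1 hkk]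
  have hnodupB : dB.keys.Nodup := by
    rw [hkeysB]
    refine List.Nodup.map_on ?_ hC3
    intro k1 h1 k2 h2 h12
    exact hc k1 k2 (hkeyroots k1 h1) (hkeyroots k2 h2) h12
  unfold PySem.Dict.modify
  cases hca : dA.contains r with
  | false =>
    have hcb : dB.contains key = false := by
      rcases hcbv : dB.contains key with _ | _
      · rfl
      · exfalso
        have := hmemiff.2 ((PySem.Dict.contains_iff_mem_keys dB key).1 hcbv)
        have hct := (PySem.Dict.contains_iff_mem_keys dA r).2 this
        rw [hca] at hct
        cases hct
    have hgA : dA.getD r [] = [] := PySem.Dict.getD_of_not_contains dA [] hca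
    have hgB : dB.getD key [] = [] := PySem.Dict.getD_of_not_contains dB [] hcb
    rw [hgA, hgB, PySem.Dict.items_insert_of_not_contains dA _ hca,
        PySem.Dict.items_insert_of_not_contains dB _ hcb, hC1, List.map_append]
    refine ⟨by simp [hkey], ?_, ?_⟩
    · intro pr hpr
      rcases List.mem_append.1 hpr with h | h
      · exact hC2 pr h
      · simp only [List.mem_singleton] at h
        subst h
        exact hr
    · have hkeys' : (dA.insert r ([] ++ [tup])).keys = dA.keys ++ [r] :=
        PySem.Dict.keys_insert_of_not_contains dA _ hca
      rw [hkeys']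
      have hrn : r ∉ dA.keys := by
        intro h
        have := (PySem.Dict.contains_iff_mem_keys dA r).2 h
        rw [hca] at this
        cases this
      simp only [List.nodup_append, List.nodup_singleton, true_and, hC3]
      intro a ha b hb
      simp only [List.mem_singleton] at hb
      subst hb
      intro hab
      exact hrn (hab ▸ ha)
  | true =>
    have hcb : dB.contains key = true :=
      (PySem.Dict.contains_iff_mem_keys dB key).2
        (hmemiff.1 ((PySem.Dict.contains_iff_mem_keys dA r).1 hca))
    obtain ⟨vA, hgetA⟩ : ∃ v, dA.get? r = some v := by
      have := PySem.Dict.contains_eq_isSome_get? dA r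
      rw [hca] at this
      cases hv : dA.get? r with
      | none => rw [hv] at this; cases this
      | some v => exact ⟨v, rfl⟩
    have hgA : dA.getD r [] = vA := PySem.Dict.getD_of_get?_eq_some dA [] hgetA
    have hmemA : (r, vA) ∈ dA.items := PySem.Dict.mem_items_of_get?_eq_some dA hgetA
    have hmemB : (key, vA) ∈ dB.items := by
      rw [hC1]
      exact List.mem_map.2 ⟨(r, vA), hmemA, by simp [hkey]⟩
    have hgB : dB.getD key [] = vA := PySem.Dict.getD_of_mem_items dB hmemB hnodupB []
    rw [hgA, hgB, PySem.Dict.items_insert_of_contains dA _ hca,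
        PySem.Dict.items_insert_of_contains dB _ hcb, hC1]
    refine ⟨?_, ?_, ?_⟩
    · rw [List.map_map, List.map_map]
      apply List.map_congr_left
      intro pr hpr
      by_cases h : pr.1 = r
      · simp [Function.comp, h, hkey]
      · have h2 : ¬ (Lab lab pr.1 = key) := fun hh => h ((hkeyinj pr hpr).1 hh)
        simp only [Function.comp_apply, beq_iff_eq, h, h2, if_false]
    · intro pr hpr
      obtain ⟨qr, hqr, rfl⟩ := List.mem_map.1 hpr
      by_cases h : qr.1 = r
      · simp only [beq_iff_eq, h, if_true]
        exact hr
      · simp only [beq_iff_eq, h, if_false]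
        exact hC2 qr hqr
    · rw [PySem.Dict.keys_insert_of_contains dA _ hca]
      exact hC3

lemma gather_spec (ys : List (List Int)) (i0 : Int) (p lab : List Int)
    (dA dB : PySem.Dict Int (List (List Int)))
    (hInv : UFInv p lab) (hct : 0 ≤ i0 ∧ i0 + ys.length ≤ (p.length : Int))
    (hC1 : dB.items = dA.items.map (fun pr => (Lab lab pr.1, pr.2)))
    (hC2 : ∀ pr ∈ dA.items, isRoot p pr.1)
    (hC3 : dA.keys.Nodup) :
    (ys.foldl
        (fun (acc : Int × PySem.Dict Int (List (List Int))) tup =>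
          (acc.1 + 1, acc.2.modify (PySem.List.pyGetD lab acc.1 0) [] (· ++ [tup])))
        (i0, dB)).2.values
      = (ys.foldl
        (fun (acc : Int × List Int × PySem.Dict Int (List (List Int))) tup =>
          let fr := ufFind (acc.2.1.length + 1) acc.2.1 acc.1
          (acc.1 + 1, fr.2, acc.2.2.modify fr.1 [] (· ++ [tup])))
        (i0, p, dA)).2.2.values := by
  induction ys generalizing i0 p dA dB with
  | nil =>
    simp only [List.foldl_nil]
    show dB.values = dA.values
    simp only [PySem.Dict.values, hC1, List.map_map]
    rfl
  | cons tup ys ih =>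
    simp only [List.foldl_cons]
    have hi0 : InRg p.length i0 := by
      constructor
      · exact hct.1
      · have := hct.2
        have hl : ((tup :: ys).length : Int) = ys.length + 1 := by push_cast [List.length_cons]; ring
        rw [hl] at this
        omega
    have hfuel : ∃ k < p.length + 1, isFixAt p i0 k :=
      fix_fast p hInv.2.1 i0 hi0 (hInv.2.2.2.2 i0 hi0)
    obtain ⟨hlen', hroot', hlab', hiff', hInv'⟩ :=
      find_spec (p.length + 1) p lab i0 hInv hi0 hfuel
    set fr := ufFind (p.length + 1) p i0 with hfr
    have hkey : PySem.List.pyGetD lab i0 0 = Lab lab fr.1 := hlab'.symm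
    have hrootP' : isRoot fr.2 fr.1 := hroot'
    have hC2' : ∀ pr ∈ dA.items, isRoot fr.2 pr.1 :=
      fun pr hpr => (hiff' pr.1).2 (hC2 pr hpr)
    obtain ⟨hD1, hD2, hD3⟩ := dict_step fr.2 lab dA dB fr.1 (PySem.List.pyGetD lab i0 0)
      tup hInv' hrootP' hkey hC1 hC2' hC3
    have hct' : 0 ≤ i0 + 1 ∧ (i0 + 1) + ys.length ≤ (fr.2.length : Int) := by
      constructor
      · omega
      · rw [hlen']
        have := hct.2
        have hl : ((tup :: ys).length : Int) = ys.length + 1 := by push_cast [List.length_cons]; ring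
        rw [hl] at this
        omega
    exact ih (i0 + 1) fr.2 _ _ hInv' hct' hD1 hD2 hD3

theorem main_eq (tl : List (List Int)) : group_tuples tl = group_tuples_alt tl := by
  have hdm : digitMapB tl = digitMapA tl := rfl
  simp only [group_tuples, group_tuples_alt, hdm, PySem.List.len_eq]
  have hlen0 : (PySem.List.pyRange 0 ((tl.length : Int)) 1).length = tl.length := by
    rw [PySem.List.length_pyRange_one]; simp
  have hls : ∀ l ∈ (digitMapA tl).2.values, ∀ j ∈ l,
      InRg (PySem.List.pyRange 0 ((tl.length : Int)) 1).length j := by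
    intro l hl j hj
    rw [hlen0]
    exact digitMap_range tl l hl j hj
  obtain ⟨hInvF, hlenF⟩ := outer_spec (digitMapA tl).2.values
    (PySem.List.pyRange 0 ((tl.length : Int)) 1)
    (PySem.List.pyRepeat [(0 : Int)] (tl.length : Int))
    (PySem.List.pyRange 0 ((tl.length : Int)) 1)
    (init_inv tl.length) hls
  have hgather := gather_spec tl 0 _ _ PySem.Dict.empty PySem.Dict.empty hInvF
    (by
      constructor
      · exact le_rfl
      · rw [hlenF, hlen0]; simp)
    (by rfl)
    (by intro pr hpr; cases hpr)
    (by simp [PySem.Dict.keys, PySem.Dict.empty])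
  exact hgather.symm

-- ===== VERDICT (by name: the statement is the Claim_ definition above) =====
theorem group_tuples_spec : Claim_equal_group_tuples :=
  fun tuples_list _ => (main_eq tuples_list : _)
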